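-- pv_equiv track=rewrite | github.com/Saitharun2416/DAA- | 24. remove first occurance character.py | lastSubstringBeforeEmpty
-- ===== SOURCE A (Python) =====
-- def lastSubstringBeforeEmpty(s: str) -> str:
--     last_substring = ""
--     char_indices = {chr(ord('a') + i): -1 for i in range(26)}
--
--     while s:
--         for char in char_indices:
--             if char in s:
--                 char_index = s.index(char)
--                 last_substring += s[:char_index]
--                 s = s[char_index+1:]
--                 char_indices[char] = -1
--                 break
--         else:
--             break
--
--     return last_substring
-- ===== SOURCE B (Python) =====
-- def lastSubstringBeforeEmpty(s: str) -> str: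
--     # Single right-to-left pass: a character is deleted iff it is a lowercase
--     # letter no greater than every lowercase letter to its right; characters
--     # with no lowercase letter anywhere to their right (the final tail) are
--     # dropped as well.  Everything else is kept, in order.
--     kept_rev = []
--     m = None  # smallest lowercase letter seen so far (scanning from the right)
--     for c in reversed(s):
--         if 'a' <= c <= 'z':
--             if m is None or c <= m:
--                 m = c          # this occurrence gets deleted by the process
--             else:
--                 kept_rev.append(c)
--         elif m is not None:
--             kept_rev.append(c)
--     return ''.join(reversed(kept_rev))
-- ===== Notes on version B (the rewrite author's own statement) =====
-- stated objective: faster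
-- what changed: A repeatedly rescans the remaining string for each of the 26 letters and rebuilds it by slicing once per deleted character; B makes a single right-to-left pass keeping the running minimum lowercase letter and keeps exactly the characters the process keeps.
import Mathlib
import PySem

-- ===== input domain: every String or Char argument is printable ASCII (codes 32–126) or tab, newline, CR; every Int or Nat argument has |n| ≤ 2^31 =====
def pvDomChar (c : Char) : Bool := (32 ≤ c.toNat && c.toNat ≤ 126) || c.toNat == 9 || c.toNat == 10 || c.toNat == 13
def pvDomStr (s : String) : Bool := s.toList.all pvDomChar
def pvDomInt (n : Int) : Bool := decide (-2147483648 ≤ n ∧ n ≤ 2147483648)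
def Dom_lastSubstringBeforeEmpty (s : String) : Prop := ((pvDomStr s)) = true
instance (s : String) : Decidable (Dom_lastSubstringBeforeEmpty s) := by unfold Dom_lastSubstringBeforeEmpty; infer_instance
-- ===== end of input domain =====

-- B replaces A's repeated scan-and-slice loop (scan the 26 letters, cut at the first
-- occurrence of the smallest present letter, repeat) by a single right-to-left pass
-- keeping the running minimum lowercase letter; same return value, one pass.

-- ===== PORT A =====
-- char_indices = {chr(ord('a') + i): -1 for i in range(26)}
def pvInitDict : PySem.Dict Char Int :=
  (PySem.List.pyRange 0 26 1).foldl
    (fun d i => d.insert (Char.ofNat ('a'.toNat + i.toNat)) (-1)) PySem.Dict.empty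

-- the 'for char in char_indices: if char in s: … break / else: break' search:
-- first key of the dict (in key order) that occurs in s
def pvFindKey (ks : List Char) (s : List Char) : Option Char :=
  match ks with
  | [] => none
  | k :: t => if PySem.Chars.isIn [k] s then some k else pvFindKey t s

-- needed by pvWhileA's termination proof
theorem pvFindKey_mem (ks s : List Char) (c : Char) (h : pvFindKey ks s = some c) :
    c ∈ s := by
  induction ks with
  | nil => simp [pvFindKey] at h
  | cons k t ih =>
    rw [pvFindKey] at h
    by_cases hk : PySem.Chars.isIn [k] s = true
    · rw [if_pos hk] at h
      cases h
      exact (List.singleton_infix_iff _ _).mp ((PySem.Chars.isIn_iff_infix _ _).mp hk)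
    · rw [if_neg hk] at h
      exact ih h

-- the 'while s:' loop; state = (last_substring, char_indices, s)
def pvWhileA (acc : List Char) (d : PySem.Dict Char Int) (s : List Char) : List Char :=
  if hs : s.isEmpty then acc
  else
    match hfk : pvFindKey d.keys s with
    | none => acc
    | some c =>
      let i : Int := PySem.Chars.find s [c]           -- char_index = s.index(char)
      pvWhileA (acc ++ PySem.Chars.slice s none (some i))   -- last_substring += s[:char_index]
        (d.insert c (-1))                                    -- char_indices[char] = -1
        (PySem.Chars.slice s (some (i + 1)) none)            -- s = s[char_index+1:]
termination_by s.length
decreasing_by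
  have hc : c ∈ s := pvFindKey_mem _ _ _ hfk
  have hi0 : (0:Int) ≤ PySem.Chars.find s [c] :=
    (PySem.Chars.find_nonneg_iff s [c]).mpr ((List.singleton_infix_iff c s).mpr hc)
  have hne : s ≠ [] := by simpa using hs
  rw [PySem.Chars.slice_eq_listSlice, PySem.List.slice_from _ (by omega)]
  have h1 : 0 < (PySem.Chars.find s [c] + 1).toNat := by omega
  have h2 : 0 < s.length := List.length_pos_of_ne_nil hne
  simp only [List.length_drop]
  omega

def lastSubstringBeforeEmpty (s : String) : String :=
  String.ofList (pvWhileA [] pvInitDict s.toList)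

-- ===== PORT B =====
-- one step of B's reversed(s) loop; state = (m, kept_rev) with kept built by cons
def pvStepB (c : Char) (st : Option Char × List Char) : Option Char × List Char :=
  if 'a' ≤ c ∧ c ≤ 'z' then
    match st.1 with
    | none => (some c, st.2)
    | some m => if c ≤ m then (some c, st.2) else (st.1, c :: st.2)
  else
    match st.1 with
    | none => st
    | some _ => (st.1, c :: st.2)

def lastSubstringBeforeEmpty_alt (s : String) : String :=
  String.ofList (s.toList.foldr pvStepB (none, [])).2

-- ===== PRECONDITION & SPEC =====
def Spec_lastSubstringBeforeEmpty (s : String) (out : String) : Prop := out = lastSubstringBeforeEmpty_alt s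
instance (s : String) (out : String) : Decidable (Spec_lastSubstringBeforeEmpty s out) := by unfold Spec_lastSubstringBeforeEmpty; infer_instance

-- ===== CLAIM (what is proved, stated in full; the proofs are below) =====
def Claim_equal_lastSubstringBeforeEmpty : Prop := ∀ (s : String), Dom_lastSubstringBeforeEmpty s → Spec_lastSubstringBeforeEmpty s (lastSubstringBeforeEmpty s)

-- ===== LEMMAS AND PROOFS =====

def azL : List Char :=
  ['a','b','c','d','e','f','g','h','i','j','k','l','m',
   'n','o','p','q','r','s','t','u','v','w','x','y','z']

set_option maxRecDepth 8000 in
theorem az_keys : pvInitDict.keys = azL := rfl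

set_option maxRecDepth 8000 in
theorem az_insert : ∀ c ∈ azL, pvInitDict.insert c (-1) = pvInitDict := by
  intro c hc; fin_cases hc <;> rfl

theorem az_lower : ∀ c ∈ azL, 'a' ≤ c ∧ c ≤ 'z' := by
  intro c hc; fin_cases hc <;> exact ⟨by decide, by decide⟩

set_option maxRecDepth 100000 in
theorem az_sorted : azL.Pairwise (· < ·) := by decide

theorem mem_az (x : Char) (h : 'a' ≤ x ∧ x ≤ 'z') : x ∈ azL := by
  have ha : 97 ≤ x.toNat := Nat.succ_le_of_lt h.1
  have hb : x.toNat ≤ 122 := Nat.lt_succ_iff.mp (Nat.lt_succ_of_le h.2)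
  rw [← Char.ofNat_toNat x]
  generalize x.toNat = n at ha hb ⊢
  interval_cases n <;> decide

-- B's fold on a string without lowercase letters does nothing
theorem pvB_no_letters (s : List Char) (h : ∀ x ∈ s, ¬('a' ≤ x ∧ x ≤ 'z')) :
    s.foldr pvStepB (none, []) = (none, []) := by
  induction s with
  | nil => rfl
  | cons x t ih =>
    simp only [List.foldr_cons]
    rw [ih (fun y hy => h y (List.mem_cons_of_mem _ hy))]
    simp [pvStepB, h x (List.mem_cons_self ..)]

-- first component of B's fold = the minimum lowercase letter of s (none if there is none)
theorem pvB_fst (s : List Char) :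
    ((s.foldr pvStepB (none, [])).1 = none ∧ ∀ x ∈ s, ¬('a' ≤ x ∧ x ≤ 'z')) ∨
    (∃ m, (s.foldr pvStepB (none, [])).1 = some m ∧ ('a' ≤ m ∧ m ≤ 'z') ∧ m ∈ s ∧
      ∀ x ∈ s, ('a' ≤ x ∧ x ≤ 'z') → m ≤ x) := by
  induction s with
  | nil => left; simp
  | cons x t ih =>
    simp only [List.foldr_cons]
    rcases ih with ⟨h1, h2⟩ | ⟨m, h1, hm, hmem, hmin⟩
    · by_cases hx : ('a' ≤ x ∧ x ≤ 'z')
      · right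
        refine ⟨x, by simp [pvStepB, hx, h1], hx, by simp, ?_⟩
        intro y hy hly
        rcases List.mem_cons.mp hy with rfl | hy
        · exact le_rfl
        · exact absurd hly (h2 y hy)
      · left
        refine ⟨by simp [pvStepB, hx, h1], ?_⟩
        intro y hy
        rcases List.mem_cons.mp hy with rfl | hy
        · exact hx
        · exact h2 y hy
    · by_cases hx : ('a' ≤ x ∧ x ≤ 'z')
      · by_cases hxm : x ≤ m
        · right
          refine ⟨x, by simp [pvStepB, hx, h1, hxm], hx, by simp, ?_⟩
          intro y hy hly
          rcases List.mem_cons.mp hy with rfl | hy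
          · exact le_rfl
          · exact le_trans hxm (hmin y hy hly)
        · right
          refine ⟨m, by simp [pvStepB, hx, h1, hxm], hm, List.mem_cons_of_mem _ hmem, ?_⟩
          intro y hy hly
          rcases List.mem_cons.mp hy with rfl | hy
          · exact (not_le.mp hxm).le
          · exact hmin y hy hly
      · right
        refine ⟨m, by simp [pvStepB, hx, h1], hm, List.mem_cons_of_mem _ hmem, ?_⟩
        intro y hy hly
        rcases List.mem_cons.mp hy with rfl | hy
        · exact absurd hly hx
        · exact hmin y hy hly

-- folding B over a prefix whose lowercase letters are all > c keeps (some c) and appends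
theorem pvB_pre (pre : List Char) (c : Char) (acc : List Char)
    (h : ∀ x ∈ pre, ('a' ≤ x ∧ x ≤ 'z') → c < x) :
    pre.foldr pvStepB (some c, acc) = (some c, pre ++ acc) := by
  induction pre with
  | nil => simp
  | cons x t ih =>
    simp only [List.foldr_cons]
    rw [ih (fun y hy hly => h y (List.mem_cons_of_mem _ hy) hly)]
    by_cases hx : ('a' ≤ x ∧ x ≤ 'z')
    · have hxc : ¬ x ≤ c := not_le.mpr (h x (List.mem_cons_self ..) hx)
      simp [pvStepB, hx, hxc]
    · simp [pvStepB, hx]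

-- one step of A's process, seen by B's fold
theorem pvB_split (pre suf : List Char) (c : Char)
    (hc : 'a' ≤ c ∧ c ≤ 'z')
    (hpre : ∀ x ∈ pre, ('a' ≤ x ∧ x ≤ 'z') → c < x)
    (hsuf : ∀ x ∈ suf, ('a' ≤ x ∧ x ≤ 'z') → c ≤ x) :
    ((pre ++ c :: suf).foldr pvStepB (none, [])).2
      = pre ++ (suf.foldr pvStepB (none, [])).2 := by
  rw [List.foldr_append]
  have hcs : (c :: suf).foldr pvStepB (none, ([] : List Char))
      = (some c, (suf.foldr pvStepB (none, [])).2) := by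
    simp only [List.foldr_cons]
    rcases pvB_fst suf with ⟨h1, _⟩ | ⟨m, h1, hm, hmem, _⟩
    · simp [pvStepB, hc, h1]
    · have hcm : c ≤ m := hsuf m hmem hm
      simp [pvStepB, hc, h1, hcm]
  rw [hcs, pvB_pre pre c _ hpre]

theorem pvFindKey_none (ks s : List Char) (h : pvFindKey ks s = none) :
    ∀ k ∈ ks, k ∉ s := by
  induction ks with
  | nil => simp
  | cons k t ih =>
    rw [pvFindKey] at h
    by_cases hk : PySem.Chars.isIn [k] s = true
    · rw [if_pos hk] at h; cases h
    · rw [if_neg hk] at h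
      intro y hy
      rcases List.mem_cons.mp hy with rfl | hy
      · intro hmem
        exact hk ((PySem.Chars.isIn_iff_infix _ _).mpr ((List.singleton_infix_iff _ _).mpr hmem))
      · exact ih h y hy

theorem pvFindKey_min (ks s : List Char) (c : Char) (hsort : ks.Pairwise (· < ·))
    (h : pvFindKey ks s = some c) :
    c ∈ ks ∧ c ∈ s ∧ ∀ k ∈ ks, k ∈ s → c ≤ k := by
  induction ks with
  | nil => simp [pvFindKey] at h
  | cons k t ih =>
    rw [pvFindKey] at h
    rcases List.pairwise_cons.mp hsort with ⟨hlt, hsort'⟩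
    by_cases hk : PySem.Chars.isIn [k] s = true
    · rw [if_pos hk] at h
      cases h
      refine ⟨by simp, (List.singleton_infix_iff _ _).mp ((PySem.Chars.isIn_iff_infix _ _).mp hk), ?_⟩
      intro y hy _
      rcases List.mem_cons.mp hy with rfl | hy
      · exact le_rfl
      · exact le_of_lt (hlt y hy)
    · rw [if_neg hk] at h
      obtain ⟨hct, hcs, hminT⟩ := ih hsort' h
      refine ⟨List.mem_cons_of_mem _ hct, hcs, ?_⟩
      intro y hy hys
      rcases List.mem_cons.mp hy with rfl | hy
      · exact absurd ((PySem.Chars.isIn_iff_infix _ _).mpr ((List.singleton_infix_iff _ _).mpr hys)) hk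
      · exact hminT y hy hys

-- main invariant: A's while loop computes acc ++ (B's fold on the rest)
theorem pvWhileA_eq (n : Nat) : ∀ s : List Char, s.length ≤ n → ∀ acc : List Char,
    pvWhileA acc pvInitDict s = acc ++ (s.foldr pvStepB (none, [])).2 := by
  induction n with
  | zero =>
    intro s hs acc
    have hnil : s = [] := List.eq_nil_of_length_eq_zero (Nat.le_zero.mp hs)
    subst hnil
    rw [pvWhileA]; simp
  | succ n ih =>
    intro s hs acc
    rcases eq_or_ne s [] with rfl | hne
    · rw [pvWhileA]; simp
    · rw [pvWhileA, dif_neg (by simpa using hne : ¬ s.isEmpty = true)]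
      cases hfk : pvFindKey pvInitDict.keys s with
      | none =>
        have hnl : ∀ x ∈ s, ¬('a' ≤ x ∧ x ≤ 'z') := by
          intro x hx hlx
          exact pvFindKey_none _ _ hfk x (az_keys ▸ mem_az x hlx) hx
        rw [pvB_no_letters s hnl]
        simp
      | some c =>
        obtain ⟨hcks, hcs, hmin0⟩ := pvFindKey_min _ s c (az_keys ▸ az_sorted) hfk
        have hcaz : c ∈ azL := az_keys ▸ hcks
        have hlc : 'a' ≤ c ∧ c ≤ 'z' := az_lower c hcaz
        have hmin : ∀ x ∈ s, ('a' ≤ x ∧ x ≤ 'z') → c ≤ x := fun x hx hlx =>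
          hmin0 x (az_keys ▸ mem_az x hlx) hx
        have hi0 : (0:Int) ≤ PySem.Chars.find s [c] :=
          (PySem.Chars.find_nonneg_iff s [c]).mpr ((List.singleton_infix_iff c s).mpr hcs)
        obtain ⟨hpref, hfirst⟩ := PySem.Chars.find_spec hi0
        set k : Nat := (PySem.Chars.find s [c]).toNat with hk
        obtain ⟨t, ht⟩ := hpref
        have hdropk : s.drop k = c :: t := ht.symm
        have hklen : k < s.length := by
          by_contra hge
          rw [List.drop_eq_nil_of_le (Nat.le_of_not_lt hge)] at hdropk
          exact List.cons_ne_nil _ _ hdropk.symm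
        have hsplit : s = s.take k ++ c :: t := by
          conv_lhs => rw [← List.take_append_drop k s]
          rw [hdropk]
        have ht1 : t = s.drop (k + 1) := by
          have := congrArg List.tail hdropk
          simpa [List.tail_drop] using this.symm
        have hcpre : c ∉ s.take k := by
          intro hmem
          obtain ⟨j, hj, hgj⟩ := List.getElem_of_mem hmem
          have hjk : j < k := lt_of_lt_of_le hj (by simp [List.length_take])
          have hj2 : j < s.length := lt_trans hjk hklen
          refine hfirst j hjk ⟨s.drop (j + 1), ?_⟩
          rw [List.drop_eq_getElem_cons hj2]
          have : s[j] = c := by rw [List.getElem_take] at hgj; exact hgj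
          simp [this]
        have hpre : ∀ x ∈ s.take k, ('a' ≤ x ∧ x ≤ 'z') → c < x := fun x hx hlx =>
          lt_of_le_of_ne (hmin x (List.mem_of_mem_take hx) hlx)
            (fun he => hcpre (he ▸ hx))
        have hsuf : ∀ x ∈ t, ('a' ≤ x ∧ x ≤ 'z') → c ≤ x := fun x hx hlx =>
          hmin x (by rw [hsplit]; exact List.mem_append_right _ (List.mem_cons_of_mem _ hx)) hlx
        have hslice1 : PySem.Chars.slice s none (some (PySem.Chars.find s [c])) = s.take k := by
          rw [PySem.Chars.slice_eq_listSlice, PySem.List.slice_to _ hi0]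
        have hslice2 : PySem.Chars.slice s (some (PySem.Chars.find s [c] + 1)) none
            = s.drop (k + 1) := by
          rw [PySem.Chars.slice_eq_listSlice, PySem.List.slice_from _ (by omega)]
          congr 1
          omega
        have hlen : (s.drop (k + 1)).length ≤ n := by
          simp only [List.length_drop]
          omega
        simp only [hslice1, hslice2, az_insert c hcaz]
        rw [ih (s.drop (k + 1)) hlen (acc ++ s.take k)]
        conv_rhs => rw [hsplit]
        rw [pvB_split (s.take k) t c hlc hpre hsuf, ← ht1, List.append_assoc]

-- ===== VERDICT (by name: the statement is the Claim_ definition above) =====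
theorem lastSubstringBeforeEmpty_spec : Claim_equal_lastSubstringBeforeEmpty := by
  intro s _
  unfold Spec_lastSubstringBeforeEmpty lastSubstringBeforeEmpty lastSubstringBeforeEmpty_alt
  rw [pvWhileA_eq s.toList.length s.toList (le_refl _) []]
  rfl
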